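-- pv_equiv track=rewrite | github.com/Vrishali34/Leetcode_POTD | Leetcode_POTD_2025/10_OCTOBER/3350_Adjacent_Increasing_Subarrays_Detection_II.py | find_max_duo_len
-- ===== SOURCE A (Python) =====
-- def find_max_duo_len(array_data):
--     n_size = len(array_data)
--
--     inc_end_len = [1] * n_size
--     for i_c in range(1, n_size):
--         if array_data[i_c - 1] < array_data[i_c]:
--             inc_end_len[i_c] = inc_end_len[i_c - 1] + 1
--
--     def is_feasible(k_len):
--         if 2 * k_len > n_size:
--             return False
--
--         limit_a = n_size - 2 * k_len
--         for start_a in range(limit_a + 1):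
--
--             end_idx_1 = start_a + k_len - 1
--             if inc_end_len[end_idx_1] < k_len:
--                 continue
--
--             end_idx_2 = start_a + 2 * k_len - 1
--             if inc_end_len[end_idx_2] >= k_len:
--                 return True
--
--         return False
--
--     min_k, max_k, max_valid_k = 1, n_size // 2, 0
--
--     while min_k <= max_k:
--         curr_k = min_k + (max_k - min_k) // 2
--         if is_feasible(curr_k):
--             max_valid_k = curr_k
--             min_k = curr_k + 1
--         else:
--             max_k = curr_k - 1
--
--     return max_valid_k
-- ===== SOURCE B (Python) =====
-- def find_max_duo_len(array_data):
--     best = 0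
--     prev = 0   # length of the previous maximal increasing run
--     cur = 0    # length of the increasing run ending at the current element
--     last = 0
--     for x in array_data:
--         if cur > 0 and last < x:
--             cur += 1
--         else:
--             prev, cur = cur, 1
--         cand = min(prev, cur)
--         half = cur // 2
--         if half > cand:
--             cand = half
--         if cand > best:
--             best = cand
--         last = x
--     return best
-- ===== Notes on version B (the rewrite author's own statement) =====
-- stated objective: faster
-- what changed: A builds an inc-run-length array and binary-searches the answer, re-scanning all windows per probe (O(n log n)); B makes one O(1)-space linear pass over the array maintaining the current and previous increasing-run lengths and maximizing max(cur//2, min(prev, cur)).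
import Mathlib
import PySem

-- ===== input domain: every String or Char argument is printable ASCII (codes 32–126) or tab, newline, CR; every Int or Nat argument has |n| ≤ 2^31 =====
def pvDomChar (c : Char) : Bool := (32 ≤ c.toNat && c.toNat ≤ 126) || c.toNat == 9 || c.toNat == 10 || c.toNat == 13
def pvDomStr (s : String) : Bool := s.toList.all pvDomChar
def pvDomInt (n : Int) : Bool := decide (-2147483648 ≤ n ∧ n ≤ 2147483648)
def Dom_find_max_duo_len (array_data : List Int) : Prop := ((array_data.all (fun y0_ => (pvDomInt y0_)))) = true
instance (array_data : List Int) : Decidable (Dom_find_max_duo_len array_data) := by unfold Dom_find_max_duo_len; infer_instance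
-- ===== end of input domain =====

-- B replaces A's binary search over an O(n) feasibility scan by one linear pass that
-- tracks the current/previous increasing-run lengths and maximizes max(cur//2, min(prev, cur)).

-- ===== PORT A =====
-- inc_end_len = [1]*n; for i_c in range(1, n): if a[i_c-1] < a[i_c]: inc[i_c] = inc[i_c-1] + 1
def pvBuildInc (a : List Int) : List Int :=
  (PySem.List.pyRange 1 (a.length : Int) 1).foldl
    (fun inc i =>
      if PySem.List.pyGetD a (i - 1) 0 < PySem.List.pyGetD a i 0 then
        PySem.List.pySetD inc i (PySem.List.pyGetD inc (i - 1) 0 + 1)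
      else inc)
    (List.replicate a.length 1)

-- is_feasible(k): early-return-True loop over start_a, ported as List.any of the success condition
def pvIsFeasible (n : Int) (inc : List Int) (k : Int) : Bool :=
  if 2 * k > n then false
  else
    (PySem.List.pyRange 0 ((n - 2 * k) + 1) 1).any (fun s =>
      !decide (PySem.List.pyGetD inc (s + k - 1) 0 < k) &&
      decide (k ≤ PySem.List.pyGetD inc (s + 2 * k - 1) 0))

-- the while-loop of the binary search, state (min_k, max_k, max_valid_k)
def pvBSearch (n : Int) (inc : List Int) (minK maxK best : Int) : Int :=
  if minK ≤ maxK then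
    let cur := minK + PySem.Int.floordiv (maxK - minK) 2
    if pvIsFeasible n inc cur then pvBSearch n inc (cur + 1) maxK cur
    else pvBSearch n inc minK (cur - 1) best
  else best
termination_by (maxK + 1 - minK).toNat
decreasing_by
  · have h := PySem.Int.floordiv_two_mid_bounds (lo := 0) (hi := maxK - minK) (by omega)
    rw [zero_add] at h; omega
  · have h := PySem.Int.floordiv_two_mid_bounds (lo := 0) (hi := maxK - minK) (by omega)
    rw [zero_add] at h; omega

def find_max_duo_len (array_data : List Int) : Int :=
  let n : Int := array_data.length
  let inc := pvBuildInc array_data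
  pvBSearch n inc 1 (PySem.Int.floordiv n 2) 0

-- ===== PORT B =====
-- single pass; state (best, prev, cur, last) as in Source B
def pvAltGo (best prev cur last : Int) : List Int → Int
  | [] => best
  | x :: xs =>
    let pc := if cur > 0 ∧ last < x then (prev, cur + 1) else (cur, 1)
    let cand0 := min pc.1 pc.2
    let half := PySem.Int.floordiv pc.2 2
    let cand := if half > cand0 then half else cand0
    let best' := if cand > best then cand else best
    pvAltGo best' pc.1 pc.2 x xs

def find_max_duo_len_alt (array_data : List Int) : Int :=
  pvAltGo 0 0 0 0 array_data

-- ===== PRECONDITION & SPEC =====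
def Spec_find_max_duo_len (array_data : List Int) (out : Int) : Prop := out = find_max_duo_len_alt array_data
instance (array_data : List Int) (out : Int) : Decidable (Spec_find_max_duo_len array_data out) := by unfold Spec_find_max_duo_len; infer_instance

-- ===== CLAIM (what is proved, stated in full; the proofs are below) =====
def Claim_equal_find_max_duo_len : Prop := ∀ (array_data : List Int), Dom_find_max_duo_len array_data → Spec_find_max_duo_len array_data (find_max_duo_len array_data)

-- ===== LEMMAS AND PROOFS =====

-- pvInc a i = length of the increasing run ending at index i ( = inc_end_len[i] )
def pvInc (a : List Int) : Nat → Int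
  | 0 => 1
  | i+1 => if a.getD i 0 < a.getD (i+1) 0 then pvInc a i + 1 else 1

-- pvPrev a i = length of the maximal increasing run just before the run containing i (0 if none)
def pvPrev (a : List Int) : Nat → Int
  | 0 => 0
  | i+1 => if a.getD i 0 < a.getD (i+1) 0 then pvPrev a i else pvInc a i

-- the per-position score maximized by B
def pvF (a : List Int) (i : Nat) : Int := max (pvInc a i / 2) (min (pvPrev a i) (pvInc a i))

def pvFF (a : List Int) : Int := ((List.range a.length).map (pvF a)).foldl max 0

theorem pvInc_pos (a : List Int) (i : Nat) : 1 ≤ pvInc a i := by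
  induction i with
  | zero => simp [pvInc]
  | succ i ih => simp only [pvInc]; split <;> omega

theorem pvInc_le (a : List Int) (i : Nat) : pvInc a i ≤ (i : Int) + 1 := by
  induction i with
  | zero => simp [pvInc]
  | succ i ih => simp only [pvInc]; split <;> [push_cast; push_cast] <;> omega

theorem pvPrev_nonneg (a : List Int) (i : Nat) : 0 ≤ pvPrev a i := by
  induction i with
  | zero => simp [pvPrev]
  | succ i ih => have := pvInc_pos a i; simp only [pvPrev]; split <;> omega

theorem pvPrev_add (a : List Int) (i : Nat) : pvPrev a i + pvInc a i ≤ (i : Int) + 1 := by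
  induction i with
  | zero => simp [pvPrev, pvInc]
  | succ i ih =>
    have h1 := pvInc_le a i
    simp only [pvPrev, pvInc]; split <;> push_cast <;> omega

theorem pvInc_sub (a : List Int) : ∀ (j i : Nat), j ≤ i → (j : Int) < pvInc a i →
    pvInc a (i - j) = pvInc a i - (j : Int) := by
  intro j
  induction j with
  | zero => intro i _ _; simp
  | succ j ih =>
    intro i hji hlt
    obtain ⟨i', rfl⟩ : ∃ i', i = i' + 1 := ⟨i - 1, by omega⟩
    have hrise : a.getD i' 0 < a.getD (i'+1) 0 := by
      by_contra h
      simp only [pvInc, if_neg h] at hlt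
      push_cast at hlt; omega
    have hstep : pvInc a (i' + 1) = pvInc a i' + 1 := by
      simp only [pvInc, if_pos hrise]
    have := ih i' (by omega) (by push_cast at hlt ⊢; omega)
    have hidx : i' + 1 - (j + 1) = i' - j := by omega
    rw [hidx, this, hstep]; push_cast; ring

theorem pvPrev_zero_of_full (a : List Int) (i : Nat) (h : (i : Int) < pvInc a i) :
    pvPrev a i = 0 := by
  induction i with
  | zero => simp [pvPrev]
  | succ i ih =>
    have hle := pvInc_le a i
    have hrise : a.getD i 0 < a.getD (i+1) 0 := by
      by_contra hc
      simp only [pvInc, if_neg hc] at h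
      push_cast at h; omega
    simp only [pvPrev, if_pos hrise]
    apply ih
    simp only [pvInc, if_pos hrise] at h
    push_cast at h ⊢; omega

theorem pvPrev_eq (a : List Int) (i : Nat) (h : pvInc a i ≤ (i : Int)) :
    pvPrev a i = pvInc a (i - (pvInc a i).toNat) := by
  induction i with
  | zero => have := pvInc_pos a 0; simp at h; omega
  | succ i ih =>
    by_cases hrise : a.getD i 0 < a.getD (i+1) 0
    · have hstep : pvInc a (i + 1) = pvInc a i + 1 := by simp only [pvInc, if_pos hrise]
      have hpos := pvInc_pos a i
      have h' : pvInc a i ≤ (i : Int) := by rw [hstep] at h; push_cast at h; omega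
      have hidx : i + 1 - (pvInc a (i+1)).toNat = i - (pvInc a i).toNat := by
        rw [hstep]; omega
      rw [hidx]
      simp only [pvPrev, if_pos hrise]
      exact ih h'
    · have hstep : pvInc a (i + 1) = 1 := by simp only [pvInc, if_neg hrise]
      simp only [pvPrev, if_neg hrise, hstep]
      norm_num

-- glue: getD after set
theorem pvGetD_set (l : List Int) (n j : Nat) (v d : Int) (hn : n < l.length) :
    (l.set n v).getD j d = if j = n then v else l.getD j d := by
  rw [List.getD_eq_getElem?_getD, List.getElem?_set, List.getD_eq_getElem?_getD]
  rcases eq_or_ne n j with h | h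
  · subst h; rw [if_pos rfl, if_pos rfl, if_pos hn]; rfl
  · rw [if_neg h, if_neg (Ne.symm h)]

-- the state of A's first loop after processing range(1, m)
def pvIncFold (a : List Int) (m : Nat) : List Int :=
  (PySem.List.pyRange 1 (m : Int) 1).foldl
    (fun inc i =>
      if PySem.List.pyGetD a (i - 1) 0 < PySem.List.pyGetD a i 0 then
        PySem.List.pySetD inc i (PySem.List.pyGetD inc (i - 1) 0 + 1)
      else inc)
    (List.replicate a.length 1)

theorem pvIncFold_succ (a : List Int) (m : Nat) (hm0 : m ≠ 0) :
    pvIncFold a (m + 1) =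
      if PySem.List.pyGetD a ((m : Int) - 1) 0 < PySem.List.pyGetD a (m : Int) 0 then
        PySem.List.pySetD (pvIncFold a m) (m : Int)
          (PySem.List.pyGetD (pvIncFold a m) ((m : Int) - 1) 0 + 1)
      else pvIncFold a m := by
  have h1m : (1:Int) ≤ (m:Int) := by exact_mod_cast Nat.one_le_iff_ne_zero.mpr hm0
  unfold pvIncFold
  rw [show ((m + 1 : Nat) : Int) = (m : Int) + 1 by push_cast; ring,
    PySem.List.pyRange_one_succ_right h1m, List.foldl_append, List.foldl_cons, List.foldl_nil]

theorem pvIncFold_base (a : List Int) (m : Nat) (hm : m ≤ 1) :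
    pvIncFold a m = List.replicate a.length 1 := by
  unfold pvIncFold
  rw [PySem.List.pyRange_one_eq_nil (by omega), List.foldl_nil]

-- characterization of A's inc_end_len array
theorem pvBuildInc_aux (a : List Int) : ∀ (m : Nat), m ≤ a.length →
    (pvIncFold a m).length = a.length ∧
    ∀ j : Nat, j < a.length →
      (pvIncFold a m).getD j 0 = if 0 < j ∧ j < m then pvInc a j else 1 := by
  intro m
  induction m with
  | zero =>
    intro _
    rw [pvIncFold_base a 0 (by omega)]
    refine ⟨by simp, ?_⟩
    intro j hj
    rw [if_neg (by omega)]
    exact List.getD_replicate _ hj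
  | succ m ih =>
    intro hm
    obtain ⟨ihlen, ihget⟩ := ih (by omega)
    by_cases hm0 : m = 0
    · subst hm0
      rw [pvIncFold_base a 1 (by omega)]
      refine ⟨by simp, ?_⟩
      intro j hj
      rw [if_neg (by omega)]
      exact List.getD_replicate _ hj
    · rw [pvIncFold_succ a m hm0]
      have hidx1 : ((m:Int) - 1) = ((m - 1 : Nat) : Int) := by omega
      have hpg : PySem.List.pyGetD a ((m:Int) - 1) 0 = a.getD (m-1) 0 := by
        rw [hidx1, PySem.List.pyGetD_natCast]
      have hpg2 : PySem.List.pyGetD a (m:Int) 0 = a.getD m 0 := by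
        rw [PySem.List.pyGetD_natCast]
      have hvl : (pvIncFold a m).getD (m-1) 0 = pvInc a (m-1) := by
        rw [ihget (m-1) (by omega)]
        by_cases h01 : 0 < m - 1
        · rw [if_pos ⟨h01, by omega⟩]
        · rw [if_neg (by omega), show m - 1 = 0 by omega]
          simp [pvInc]
      have hpgl : PySem.List.pyGetD (pvIncFold a m) ((m:Int) - 1) 0 = pvInc a (m-1) := by
        rw [hidx1, PySem.List.pyGetD_natCast, hvl]
      have hpvm : pvInc a m = if a.getD (m-1) 0 < a.getD m 0 then pvInc a (m-1) + 1 else 1 := by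
        obtain ⟨m', rfl⟩ : ∃ m', m = m' + 1 := ⟨m-1, by omega⟩
        simp [pvInc]
      by_cases hr : a.getD (m-1) 0 < a.getD m 0
      · rw [if_pos (by rw [hpg, hpg2]; exact hr)]
        rw [hpgl, PySem.List.pySetD_natCast]
        refine ⟨by rw [List.length_set, ihlen], ?_⟩
        intro j hj
        rw [pvGetD_set (pvIncFold a m) m j _ 0 (by rw [ihlen]; omega)]
        by_cases hjm : j = m
        · subst hjm
          rw [if_pos rfl, if_pos ⟨by omega, by omega⟩, hpvm, if_pos hr]
        · rw [if_neg hjm, ihget j hj]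
          by_cases hj2 : 0 < j ∧ j < m
          · rw [if_pos hj2, if_pos ⟨hj2.1, by omega⟩]
          · rw [if_neg hj2, if_neg (by omega)]
      · rw [if_neg (by rw [hpg, hpg2]; exact hr)]
        refine ⟨ihlen, ?_⟩
        intro j hj
        rw [ihget j hj]
        by_cases hjm : j = m
        · subst hjm
          rw [if_neg (by omega), if_pos ⟨by omega, by omega⟩, hpvm, if_neg hr]
        · by_cases hj2 : 0 < j ∧ j < m
          · rw [if_pos hj2, if_pos ⟨hj2.1, by omega⟩]
          · rw [if_neg hj2, if_neg (by omega)]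

theorem pvBuildInc_getD (a : List Int) (j : Nat) (hj : j < a.length) :
    (pvBuildInc a).getD j 0 = pvInc a j := by
  obtain ⟨_, h2⟩ := pvBuildInc_aux a a.length (le_refl _)
  have hBI : pvBuildInc a = pvIncFold a a.length := rfl
  rw [hBI, h2 j hj]
  by_cases h0 : 0 < j
  · simp [h0, hj]
  · have : j = 0 := by omega
    subst this; simp [pvInc]

-- forward combinatorial core: a feasible placement yields a high score
theorem pvFeas_to (a : List Int) (k : Int) (kn sn : Nat) (hk : 1 ≤ k) (hkn : (kn : Int) = k)
    (_hle : sn + 2 * kn ≤ a.length)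
    (h1 : k ≤ pvInc a (sn + kn - 1)) (h2 : k ≤ pvInc a (sn + 2 * kn - 1)) :
    k ≤ pvF a (sn + 2 * kn - 1) := by
  have hkn1 : 1 ≤ kn := by omega
  by_cases hL : 2 * k ≤ pvInc a (sn + 2 * kn - 1)
  · simp only [pvF]; omega
  · have heq : pvInc a (sn + 2 * kn - 1) = k := by
      by_contra hne
      have hkL : k < pvInc a (sn + 2 * kn - 1) := by omega
      have hsub := pvInc_sub a kn (sn + 2 * kn - 1) (by omega) (by omega)
      rw [show sn + 2 * kn - 1 - kn = sn + kn - 1 by omega] at hsub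
      omega
    have hprev : pvPrev a (sn + 2 * kn - 1) = pvInc a (sn + kn - 1) := by
      have h := pvPrev_eq a (sn + 2 * kn - 1) (by omega)
      rwa [show (pvInc a (sn + 2 * kn - 1)).toNat = kn by omega,
        show sn + 2 * kn - 1 - kn = sn + kn - 1 by omega] at h
    simp only [pvF]; omega

-- backward combinatorial core: a high score yields a feasible placement
theorem pvF_to (a : List Int) (k : Int) (kn i : Nat) (hk : 1 ≤ k) (hkn : (kn : Int) = k)
    (hi : i < a.length) (hf : k ≤ pvF a i) :
    ∃ sn : Nat, sn + 2 * kn ≤ a.length ∧ k ≤ pvInc a (sn + kn - 1) ∧ k ≤ pvInc a (sn + 2 * kn - 1) := by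
  have hkn1 : 1 ≤ kn := by omega
  have hpos := pvInc_pos a i
  have hle := pvInc_le a i
  simp only [pvF] at hf
  by_cases hhalf : k ≤ pvInc a i / 2
  · have h2k : 2 * k ≤ pvInc a i := by omega
    refine ⟨i + 1 - 2 * kn, by omega, ?_, ?_⟩
    · have hsub := pvInc_sub a kn i (by omega) (by omega)
      rw [show i + 1 - 2 * kn + kn - 1 = i - kn by omega]
      omega
    · rw [show i + 1 - 2 * kn + 2 * kn - 1 = i by omega]
      omega
  · have hmin1 : k ≤ pvPrev a i := by omega
    have hmin2 : k ≤ pvInc a i := by omega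
    have hni : pvInc a i ≤ (i : Int) := by
      by_contra hc
      have := pvPrev_zero_of_full a i (by omega)
      omega
    have hprev := pvPrev_eq a i hni
    have hstle := pvInc_le a (i - (pvInc a i).toNat)
    have hstpos := pvInc_pos a (i - (pvInc a i).toNat)
    refine ⟨i - (pvInc a i).toNat + 1 - kn, by omega, ?_, ?_⟩
    · rw [show i - (pvInc a i).toNat + 1 - kn + kn - 1 = i - (pvInc a i).toNat by omega]
      omega
    · rw [show i - (pvInc a i).toNat + 1 - kn + 2 * kn - 1 = i - (pvInc a i).toNat + kn by omega]
      have hsub := pvInc_sub a ((pvInc a i).toNat - kn) i (by omega) (by omega)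
      rw [show i - ((pvInc a i).toNat - kn) = i - (pvInc a i).toNat + kn by omega] at hsub
      omega

theorem pvIsFeasible_iff (a : List Int) (k : Int) (hk : 1 ≤ k) :
    pvIsFeasible (a.length : Int) (pvBuildInc a) k = true ↔ ∃ i : Nat, i < a.length ∧ k ≤ pvF a i := by
  constructor
  · intro h
    unfold pvIsFeasible at h
    by_cases h2 : 2 * k > (a.length : Int)
    · rw [if_pos h2] at h; simp at h
    · rw [if_neg h2] at h
      rcases List.any_eq_true.mp h with ⟨s, hs, hcond⟩
      rw [PySem.List.mem_pyRange_one] at hs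
      simp only [Bool.and_eq_true, Bool.not_eq_eq_eq_not, Bool.not_true, decide_eq_true_eq,
        decide_eq_false_iff_not, not_lt] at hcond
      obtain ⟨hc1, hc2⟩ := hcond
      have hkn : ((k.toNat : Nat) : Int) = k := by omega
      have hsn : ((s.toNat : Nat) : Int) = s := by omega
      have hi1 : (s + k - 1) = ((s.toNat + k.toNat - 1 : Nat) : Int) := by omega
      have hi2 : (s + 2 * k - 1) = ((s.toNat + 2 * k.toNat - 1 : Nat) : Int) := by omega
      rw [hi1, PySem.List.pyGetD_natCast, pvBuildInc_getD a _ (by omega)] at hc1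
      rw [hi2, PySem.List.pyGetD_natCast, pvBuildInc_getD a _ (by omega)] at hc2
      exact ⟨s.toNat + 2 * k.toNat - 1, by omega,
        pvFeas_to a k k.toNat s.toNat hk hkn (by omega) hc1 hc2⟩
  · rintro ⟨i, hi, hf⟩
    obtain ⟨sn, hsle, hA, hB⟩ := pvF_to a k k.toNat i hk (by omega) hi hf
    unfold pvIsFeasible
    rw [if_neg (by omega)]
    apply List.any_eq_true.mpr
    refine ⟨(sn : Int), by rw [PySem.List.mem_pyRange_one]; omega, ?_⟩
    have hi1 : ((sn : Int) + k - 1) = ((sn + k.toNat - 1 : Nat) : Int) := by omega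
    have hi2 : ((sn : Int) + 2 * k - 1) = ((sn + 2 * k.toNat - 1 : Nat) : Int) := by omega
    rw [hi1, hi2, PySem.List.pyGetD_natCast, PySem.List.pyGetD_natCast,
      pvBuildInc_getD a _ (by omega), pvBuildInc_getD a _ (by omega)]
    simp only [Bool.and_eq_true, Bool.not_eq_eq_eq_not, Bool.not_true, decide_eq_true_eq,
      decide_eq_false_iff_not, not_lt]
    exact ⟨hA, hB⟩

theorem pvF_twice_le (a : List Int) (i : Nat) (hi : i < a.length) :
    2 * pvF a i ≤ (a.length : Int) := by
  have h1 := pvInc_le a i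
  have h2 := pvPrev_add a i
  have h3 := pvInc_pos a i
  have h4 := pvPrev_nonneg a i
  have hn : (i : Int) + 1 ≤ (a.length : Int) := by exact_mod_cast hi
  simp only [pvF]
  omega

theorem pvFF_nonneg (a : List Int) : 0 ≤ pvFF a :=
  (PySem.List.le_foldl_max ((List.range a.length).map (pvF a)) 0).1

theorem le_pvFF (a : List Int) (i : Nat) (hi : i < a.length) : pvF a i ≤ pvFF a := by
  apply (PySem.List.le_foldl_max ((List.range a.length).map (pvF a)) 0).2
  exact List.mem_map_of_mem (List.mem_range.mpr hi)

theorem pvFF_mem (a : List Int) : pvFF a = 0 ∨ ∃ i : Nat, i < a.length ∧ pvFF a = pvF a i := by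
  rcases PySem.List.foldl_max_mem ((List.range a.length).map (pvF a)) 0 with h | h
  · exact Or.inl h
  · right
    rcases List.mem_map.mp h with ⟨i, hi, hv⟩
    exact ⟨i, List.mem_range.mp hi, hv.symm⟩

theorem pvFeasible_FF (a : List Int) (k : Int) (hk : 1 ≤ k) :
    pvIsFeasible (a.length : Int) (pvBuildInc a) k = true ↔ k ≤ pvFF a := by
  rw [pvIsFeasible_iff a k hk]
  constructor
  · rintro ⟨i, hi, hf⟩
    exact le_trans hf (le_pvFF a i hi)
  · intro hle
    rcases pvFF_mem a with h | ⟨i, hi, hv⟩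
    · omega
    · exact ⟨i, hi, by omega⟩

theorem pvBSearch_eq (a : List Int) :
    ∀ (fuel : Nat) (minK maxK best : Int), (maxK + 1 - minK).toNat ≤ fuel →
      minK = best + 1 → 0 ≤ best → best ≤ pvFF a → pvFF a ≤ maxK →
      pvBSearch (a.length : Int) (pvBuildInc a) minK maxK best = pvFF a := by
  intro fuel
  induction fuel with
  | zero =>
    intro minK maxK best hfuel h1 h2 h3 h4
    rw [pvBSearch, if_neg (by omega)]
    omega
  | succ fuel ih =>
    intro minK maxK best hfuel h1 h2 h3 h4
    rw [pvBSearch]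
    by_cases hc : minK ≤ maxK
    · rw [if_pos hc]
      have hmid := PySem.Int.floordiv_two_mid_bounds (lo := 0) (hi := maxK - minK) (by omega)
      rw [zero_add] at hmid
      set mid := PySem.Int.floordiv (maxK - minK) 2 with hmid'
      by_cases hf : pvIsFeasible (a.length : Int) (pvBuildInc a) (minK + mid) = true
      · rw [if_pos hf]
        have hcur : minK + mid ≤ pvFF a := (pvFeasible_FF a _ (by omega)).mp hf
        exact ih (minK + mid + 1) maxK (minK + mid) (by omega) rfl (by omega) hcur h4
      · rw [if_neg hf]
        have hcur : ¬ (minK + mid ≤ pvFF a) := fun h => hf ((pvFeasible_FF a _ (by omega)).mpr h)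
        exact ih minK (minK + mid - 1) best (by omega) h1 h2 h3 (by omega)
    · rw [if_neg hc]
      omega

theorem pvA_eq (a : List Int) : find_max_duo_len a = pvFF a := by
  have h2 : PySem.Int.floordiv (a.length : Int) 2 = (a.length : Int) / 2 :=
    PySem.Int.floordiv_eq_ediv_of_pos (by norm_num)
  have hFF : pvFF a ≤ (a.length : Int) / 2 := by
    rcases pvFF_mem a with h | ⟨i, hi, hv⟩
    · have : (0:Int) ≤ (a.length : Int) := by positivity
      omega
    · have := pvF_twice_le a i hi
      omega
  show pvBSearch (a.length : Int) (pvBuildInc a) 1 (PySem.Int.floordiv (a.length : Int) 2) 0 = pvFF a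
  exact pvBSearch_eq a ((PySem.Int.floordiv (a.length : Int) 2 + 1 - 1).toNat) 1 _ 0
    (le_refl _) rfl (le_refl _) (pvFF_nonneg a) (by omega)

theorem pvAltGo_spec (a : List Int) :
    ∀ (xs : List Int) (m : Nat) (best : Int), m < a.length → xs = a.drop (m + 1) →
      pvAltGo best (pvPrev a m) (pvInc a m) (a.getD m 0) xs =
        ((List.range' (m + 1) (a.length - (m + 1))).map (pvF a)).foldl max best := by
  intro xs
  induction xs with
  | nil =>
    intro m best hm hxs
    have hlen : a.length ≤ m + 1 := List.drop_eq_nil_iff.mp hxs.symm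
    rw [show a.length - (m + 1) = 0 by omega, List.range'_zero]
    simp [pvAltGo]
  | cons x rest ih =>
    intro m best hm hxs
    have hlt : m + 1 < a.length := by
      by_contra hc
      rw [List.drop_eq_nil_iff.mpr (by omega)] at hxs
      simp at hxs
    rw [List.drop_eq_getElem_cons hlt] at hxs
    obtain ⟨hx, hrest⟩ : x = a[m+1] ∧ rest = a.drop (m + 2) := by
      constructor <;> [exact (List.cons.injEq .. ▸ hxs).1; exact (List.cons.injEq .. ▸ hxs).2]
    have hxg : x = a.getD (m+1) 0 := by rw [hx, List.getD_eq_getElem a 0 hlt]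
    have hcond : (pvInc a m > 0 ∧ a.getD m 0 < x) ↔ (a.getD m 0 < a.getD (m+1) 0) := by
      have := pvInc_pos a m
      rw [hxg]
      constructor
      · exact fun h => h.2
      · exact fun h => ⟨by omega, h⟩
    simp only [pvAltGo]
    by_cases hr : a.getD m 0 < a.getD (m+1) 0
    · rw [if_pos (hcond.mpr hr)]
      simp only []
      have hpc1 : pvPrev a (m+1) = pvPrev a m := by simp only [pvPrev, if_pos hr]
      have hpc2 : pvInc a (m+1) = pvInc a m + 1 := by simp only [pvInc, if_pos hr]
      rw [hxg, ← hpc1, ← hpc2]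
      rw [ih (m+1) _ hlt hrest]
      rw [show a.length - (m + 1) = (a.length - (m + 2)) + 1 by omega, List.range'_succ,
        List.map_cons, List.foldl_cons]
      congr 1
      rw [PySem.Int.floordiv_eq_ediv_of_pos (a := pvInc a (m+1)) (by norm_num)]
      simp only [pvF]
      split_ifs <;> omega
    · rw [if_neg (fun h => hr (hcond.mp h))]
      simp only []
      have hpc1 : pvPrev a (m+1) = pvInc a m := by simp only [pvPrev, if_neg hr]
      have hpc2 : pvInc a (m+1) = 1 := by simp only [pvInc, if_neg hr]
      rw [hxg, ← hpc1, ← hpc2]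
      rw [ih (m+1) _ hlt hrest]
      rw [show a.length - (m + 1) = (a.length - (m + 2)) + 1 by omega, List.range'_succ,
        List.map_cons, List.foldl_cons]
      congr 1
      rw [PySem.Int.floordiv_eq_ediv_of_pos (a := pvInc a (m+1)) (by norm_num)]
      simp only [pvF]
      split_ifs <;> omega

theorem pvB_eq (a : List Int) : find_max_duo_len_alt a = pvFF a := by
  cases a with
  | nil => rfl
  | cons y rest =>
    have hF0 : pvF (y :: rest) 0 = 0 := by
      simp [pvF, pvInc, pvPrev]
    have hstep : find_max_duo_len_alt (y :: rest) = pvAltGo 0 (pvPrev (y :: rest) 0) (pvInc (y :: rest) 0) ((y :: rest).getD 0 0) rest := by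
      have hc : ¬((0:Int) > 0 ∧ (0:Int) < y) := by simp
      show pvAltGo 0 0 0 0 (y :: rest) = _
      simp only [pvAltGo, if_neg hc]
      norm_num [pvPrev, pvInc, show PySem.Int.floordiv 1 2 = 0 by decide]
    rw [hstep, pvAltGo_spec (y :: rest) rest 0 0 (by simp) (by simp)]
    show _ = pvFF (y :: rest)
    unfold pvFF
    rw [show (y :: rest).length = rest.length + 1 by simp, List.range_eq_range', List.range'_succ,
      List.map_cons, List.foldl_cons, hF0]
    norm_num

-- ===== VERDICT (by name: the statement is the Claim_ definition above) =====
theorem find_max_duo_len_spec : Claim_equal_find_max_duo_len := by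
  intro a _
  unfold Spec_find_max_duo_len
  rw [pvA_eq, pvB_eq]
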